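-- pv_equiv track=rewrite | github.com/thomasnormal/circt | utils/run_opentitan_connectivity_circt_lec.py | collect_connectivity_lec_status_counts
-- ===== SOURCE A (Python) =====
-- CONNECTIVITY_LEC_STATUS_FIELDS = (
--     "case_total",
--     "case_pass",
--     "case_fail",
--     "case_xfail",
--     "case_xpass",
--     "case_error",
--     "case_skip",
-- )
--
-- def normalize_connectivity_rule_id(case_id: str) -> str:
--     token = case_id.strip()
--     prefix = "connectivity::"
--     if token.startswith(prefix):
--         return token[len(prefix) :]
--     return token
--
-- def init_connectivity_lec_status_counts() -> dict[str, int]: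
--     return {field: 0 for field in CONNECTIVITY_LEC_STATUS_FIELDS}
--
-- def collect_connectivity_lec_status_counts(
--     case_rows: list[tuple[str, ...]],
-- ) -> dict[str, dict[str, int]]:
--     by_rule: dict[str, dict[str, int]] = {}
--
--     def get_counts(rule_id: str) -> dict[str, int]:
--         return by_rule.setdefault(rule_id, init_connectivity_lec_status_counts())
--
--     for row in case_rows:
--         if len(row) < 2:
--             continue
--         rule_id = normalize_connectivity_rule_id(row[1])
--         if not rule_id:
--             continue
--         status = (row[0] if row else "").strip().upper()
--         counts = get_counts(rule_id)
--         counts["case_total"] += 1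
--         if status == "PASS":
--             counts["case_pass"] += 1
--         elif status == "FAIL":
--             counts["case_fail"] += 1
--         elif status == "XFAIL":
--             counts["case_xfail"] += 1
--         elif status == "XPASS":
--             counts["case_xpass"] += 1
--         elif status == "SKIP":
--             counts["case_skip"] += 1
--         else:
--             counts["case_error"] += 1
--
--     return by_rule
-- ===== SOURCE B (Python) =====
-- _PREFIX = "connectivity::"
--
-- def _norm_rule(case_id):
--     token = case_id.strip()
--     return token[len(_PREFIX):] if token.startswith(_PREFIX) else token
--
-- def collect_connectivity_lec_status_counts(case_rows):
--     # pass 1: group the normalized statuses per rule, in first-occurrence rule order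
--     groups = {}
--     for row in case_rows:
--         if len(row) < 2:
--             continue
--         rule_id = _norm_rule(row[1])
--         if not rule_id:
--             continue
--         groups.setdefault(rule_id, []).append(row[0].strip().upper())
--     # pass 2: project each rule's status list onto the seven fixed fields
--     result = {}
--     for rule_id, statuses in groups.items():
--         total = len(statuses)
--         p = statuses.count("PASS")
--         f = statuses.count("FAIL")
--         xf = statuses.count("XFAIL")
--         xp = statuses.count("XPASS")
--         sk = statuses.count("SKIP")
--         result[rule_id] = {
--             "case_total": total,
--             "case_pass": p,
--             "case_fail": f,
--             "case_xfail": xf,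
--             "case_xpass": xp,
--             "case_error": total - (p + f + xf + xp + sk),
--             "case_skip": sk,
--         }
--     return result
-- ===== Notes on version B (the rewrite author's own statement) =====
-- stated objective: idiomatic
-- what changed: Replaces A's single pass of per-row conditional in-place counter increments with a group-then-project scheme: pass 1 collects each rule's normalized status strings into a list, pass 2 derives the seven fields by counting (case_error computed as total minus the five named statuses).
import Mathlib
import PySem

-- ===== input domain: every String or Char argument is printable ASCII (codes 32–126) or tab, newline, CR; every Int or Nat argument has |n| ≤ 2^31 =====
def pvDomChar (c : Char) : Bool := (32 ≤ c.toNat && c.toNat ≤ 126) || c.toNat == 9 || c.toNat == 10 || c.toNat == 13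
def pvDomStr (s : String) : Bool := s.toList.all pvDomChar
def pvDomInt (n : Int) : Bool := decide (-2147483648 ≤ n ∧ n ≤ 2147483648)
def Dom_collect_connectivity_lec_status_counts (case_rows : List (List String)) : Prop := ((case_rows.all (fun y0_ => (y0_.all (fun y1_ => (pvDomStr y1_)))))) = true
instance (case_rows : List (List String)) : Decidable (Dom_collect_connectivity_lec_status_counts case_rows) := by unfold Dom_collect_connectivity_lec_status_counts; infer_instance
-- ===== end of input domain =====

-- B replaces A's in-place conditional counter increments by a group-then-project two-pass
-- scheme (pass 1 groups statuses per rule, pass 2 counts them into the seven fields); objective: idiomatic.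

-- ===== PORT A =====
def pvFieldsA : List String :=
  ["case_total", "case_pass", "case_fail", "case_xfail", "case_xpass", "case_error", "case_skip"]

def normalize_connectivity_rule_id (case_id : String) : String :=
  let token := PySem.Str.strip case_id
  let prefx := "connectivity::"
  if PySem.Str.startswith token prefx then
    PySem.Str.slice token (some (PySem.Str.len prefx)) none
  else token

def init_connectivity_lec_status_counts : PySem.Dict String Int :=
  pvFieldsA.foldl (fun d f => d.insert f 0) PySem.Dict.empty

-- the body of A's 'for row in case_rows' loop
def pvStepA (by_rule : PySem.Dict String (PySem.Dict String Int)) (row : List String) :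
    PySem.Dict String (PySem.Dict String Int) :=
  if row.length < 2 then by_rule
  else
    let rule_id := normalize_connectivity_rule_id (PySem.List.pyGetD row 1 "")
    if rule_id = "" then by_rule
    else
      let status := PySem.Str.upper (PySem.Str.strip
        (if row.length ≠ 0 then PySem.List.pyGetD row 0 "" else ""))
      -- get_counts: setdefault, then the shared dict that the Python mutates in place
      let br := by_rule.setdefault rule_id init_connectivity_lec_status_counts
      let counts := br.getD rule_id init_connectivity_lec_status_counts
      let counts := counts.modify "case_total" 0 (· + 1)
      let counts :=
        if status = "PASS" then counts.modify "case_pass" 0 (· + 1)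
        else if status = "FAIL" then counts.modify "case_fail" 0 (· + 1)
        else if status = "XFAIL" then counts.modify "case_xfail" 0 (· + 1)
        else if status = "XPASS" then counts.modify "case_xpass" 0 (· + 1)
        else if status = "SKIP" then counts.modify "case_skip" 0 (· + 1)
        else counts.modify "case_error" 0 (· + 1)
      br.insert rule_id counts

def collect_connectivity_lec_status_counts (case_rows : List (List String)) :
    List (String × List (String × Int)) :=
  (case_rows.foldl pvStepA PySem.Dict.empty).items.map (fun p => (p.1, p.2.items))

-- ===== PORT B =====
def pvNormRule (case_id : String) : String :=
  let token := PySem.Str.strip case_id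
  if PySem.Str.startswith token "connectivity::" then
    PySem.Str.slice token (some (PySem.Str.len "connectivity::")) none
  else token

-- body of B's grouping loop (pass 1)
def pvStepB (groups : PySem.Dict String (List String)) (row : List String) :
    PySem.Dict String (List String) :=
  if row.length < 2 then groups
  else
    let rule_id := pvNormRule (PySem.List.pyGetD row 1 "")
    if rule_id = "" then groups
    else
      groups.insert rule_id
        (groups.getD rule_id [] ++ [PySem.Str.upper (PySem.Str.strip (PySem.List.pyGetD row 0 ""))])

-- B's projection of one rule's status list onto the seven fields (pass 2)
def pvProject (statuses : List String) : List (String × Int) :=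
  let total : Int := statuses.length
  let pa : Int := PySem.List.count statuses "PASS"
  let fa : Int := PySem.List.count statuses "FAIL"
  let xf : Int := PySem.List.count statuses "XFAIL"
  let xp : Int := PySem.List.count statuses "XPASS"
  let sk : Int := PySem.List.count statuses "SKIP"
  [("case_total", total), ("case_pass", pa), ("case_fail", fa), ("case_xfail", xf),
   ("case_xpass", xp), ("case_error", total - (pa + fa + xf + xp + sk)), ("case_skip", sk)]

def collect_connectivity_lec_status_counts_alt (case_rows : List (List String)) :
    List (String × List (String × Int)) :=
  let groups := case_rows.foldl pvStepB PySem.Dict.empty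
  groups.items.map (fun p => (p.1, pvProject p.2))

-- ===== PRECONDITION & SPEC =====
def Spec_collect_connectivity_lec_status_counts (case_rows : List (List String)) (out : List (String × List (String × Int))) : Prop := out = collect_connectivity_lec_status_counts_alt case_rows
instance (case_rows : List (List String)) (out : List (String × List (String × Int))) : Decidable (Spec_collect_connectivity_lec_status_counts case_rows out) := by unfold Spec_collect_connectivity_lec_status_counts; infer_instance

-- ===== CLAIM (what is proved, stated in full; the proofs are below) =====
def Claim_equal_collect_connectivity_lec_status_counts : Prop := ∀ (case_rows : List (List String)), Dom_collect_connectivity_lec_status_counts case_rows → Spec_collect_connectivity_lec_status_counts case_rows (collect_connectivity_lec_status_counts case_rows)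

-- ===== LEMMAS AND PROOFS =====

-- value-map of a status-list dict into a counts dict, the bridge between the two states
def pvMapVal (g : PySem.Dict String (List String)) : PySem.Dict String (PySem.Dict String Int) :=
  PySem.Dict.mk (g.items.map (fun p => (p.1, PySem.Dict.mk (pvProject p.2))))

theorem pv_get?_mapVal (g : PySem.Dict String (List String)) (k : String) :
    (pvMapVal g).get? k = (g.get? k).map (fun l => PySem.Dict.mk (pvProject l)) := by
  simp [pvMapVal, PySem.Dict.get?, List.find?_map, Function.comp_def]

theorem pv_contains_mapVal (g : PySem.Dict String (List String)) (k : String) :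
    (pvMapVal g).contains k = g.contains k := by
  rw [PySem.Dict.contains_eq_isSome_get?, PySem.Dict.contains_eq_isSome_get?, pv_get?_mapVal,
    Option.isSome_map]

theorem pv_mapVal_insert (g : PySem.Dict String (List String)) (k : String) (v : List String) :
    pvMapVal (g.insert k v) = (pvMapVal g).insert k (PySem.Dict.mk (pvProject v)) := by
  apply PySem.Dict.ext
  have hc := pv_contains_mapVal g k
  rw [PySem.Dict.items_insert]
  by_cases h : g.contains k = true
  · rw [hc] at *
    simp only [if_pos, pvMapVal, PySem.Dict.items_insert, h, List.map_map]
    apply List.map_congr_left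
    intro p _
    by_cases hp : p.1 = k <;> simp [hp]
  · have h' : g.contains k = false := by simpa using h
    rw [hc] at *
    simp [h', pvMapVal, PySem.Dict.items_insert]

-- A's per-status update on a projected dict is B's projection of the appended list
theorem pv_step_counts (l : List String) (s : String) :
    (let counts := (PySem.Dict.mk (pvProject l)).modify "case_total" 0 (· + 1)
     if s = "PASS" then counts.modify "case_pass" 0 (· + 1)
     else if s = "FAIL" then counts.modify "case_fail" 0 (· + 1)
     else if s = "XFAIL" then counts.modify "case_xfail" 0 (· + 1)
     else if s = "XPASS" then counts.modify "case_xpass" 0 (· + 1)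
     else if s = "SKIP" then counts.modify "case_skip" 0 (· + 1)
     else counts.modify "case_error" 0 (· + 1)) = PySem.Dict.mk (pvProject (l ++ [s])) := by
  by_cases h1 : s = "PASS"
  · subst h1
    simp [pvProject, PySem.Dict.modify, PySem.Dict.insert, PySem.Dict.contains, PySem.Dict.getD,
      PySem.Dict.get?, PySem.List.count_eq, List.count_append]
    omega
  · by_cases h2 : s = "FAIL"
    · subst h2
      simp [pvProject, PySem.Dict.modify, PySem.Dict.insert, PySem.Dict.contains, PySem.Dict.getD,
        PySem.Dict.get?, PySem.List.count_eq, List.count_append]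
      omega
    · by_cases h3 : s = "XFAIL"
      · subst h3
        simp [pvProject, PySem.Dict.modify, PySem.Dict.insert, PySem.Dict.contains, PySem.Dict.getD,
          PySem.Dict.get?, PySem.List.count_eq, List.count_append]
        omega
      · by_cases h4 : s = "XPASS"
        · subst h4
          simp [pvProject, PySem.Dict.modify, PySem.Dict.insert, PySem.Dict.contains, PySem.Dict.getD,
            PySem.Dict.get?, PySem.List.count_eq, List.count_append]
          omega
        · by_cases h5 : s = "SKIP"
          · subst h5
            simp [pvProject, PySem.Dict.modify, PySem.Dict.insert, PySem.Dict.contains, PySem.Dict.getD,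
              PySem.Dict.get?, PySem.List.count_eq, List.count_append]
            omega
          · simp [pvProject, PySem.Dict.modify, PySem.Dict.insert, PySem.Dict.contains, PySem.Dict.getD,
              PySem.Dict.get?, PySem.List.count_eq, List.count_append, h1, h2, h3, h4, h5, beq_iff_eq,
              Ne.symm]
            omega

theorem pv_norm_eq : normalize_connectivity_rule_id = pvNormRule := rfl

theorem pv_init_eq : init_connectivity_lec_status_counts = PySem.Dict.mk (pvProject []) := by decide

theorem pv_stepA_mapVal (g : PySem.Dict String (List String)) (row : List String) :
    pvStepA (pvMapVal g) row = pvMapVal (pvStepB g row) := by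
  unfold pvStepA pvStepB
  by_cases h2 : row.length < 2
  · simp [h2]
  · simp only [if_neg h2, pv_norm_eq]
    by_cases hr : pvNormRule (PySem.List.pyGetD row 1 "") = ""
    · simp [hr]
    · simp only [if_neg hr]
      have hnz : row.length ≠ 0 := by omega
      simp only [hnz, ne_eq, not_false_iff, if_pos]
      set rid := pvNormRule (PySem.List.pyGetD row 1 "") with hrid
      set st := PySem.Str.upper (PySem.Str.strip (PySem.List.pyGetD row 0 "")) with hst
      by_cases hc : g.contains rid = true
      · have hcm : (pvMapVal g).contains rid = true := by rw [pv_contains_mapVal]; exact hc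
        rw [PySem.Dict.setdefault_of_contains _ _ hcm]
        obtain ⟨old, hold⟩ : ∃ old, g.get? rid = some old := by
          rw [PySem.Dict.contains_eq_isSome_get?] at hc
          exact Option.isSome_iff_exists.mp hc
        have hgd : (pvMapVal g).getD rid init_connectivity_lec_status_counts
            = PySem.Dict.mk (pvProject old) := by
          rw [PySem.Dict.getD_eq_get?_getD, pv_get?_mapVal, hold]; rfl
        have hgd2 : g.getD rid [] = old := by rw [PySem.Dict.getD_eq_get?_getD, hold]; rfl
        rw [hgd, hgd2, pv_step_counts old st, pv_mapVal_insert]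
      · have hc' : g.contains rid = false := by simpa using hc
        have hcm : (pvMapVal g).contains rid = false := by rw [pv_contains_mapVal]; exact hc'
        rw [PySem.Dict.setdefault_of_not_contains _ _ hcm]
        have hgd : ((pvMapVal g).insert rid init_connectivity_lec_status_counts).getD rid
            init_connectivity_lec_status_counts = PySem.Dict.mk (pvProject []) := by
          rw [PySem.Dict.getD_insert_self, pv_init_eq]
        have hgd2 : g.getD rid [] = [] := PySem.Dict.getD_of_not_contains _ _ hc'
        rw [hgd, hgd2, pv_step_counts [] st, PySem.Dict.insert_insert_self, pv_mapVal_insert]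

theorem pv_fold_mapVal (rows : List (List String)) (g : PySem.Dict String (List String)) :
    rows.foldl pvStepA (pvMapVal g) = pvMapVal (rows.foldl pvStepB g) := by
  induction rows generalizing g with
  | nil => rfl
  | cons r rs ih => simp [List.foldl_cons, pv_stepA_mapVal, ih]

-- ===== VERDICT (by name: the statement is the Claim_ definition above) =====
theorem collect_connectivity_lec_status_counts_spec : Claim_equal_collect_connectivity_lec_status_counts := by
  intro case_rows _
  unfold Spec_collect_connectivity_lec_status_counts
  unfold collect_connectivity_lec_status_counts collect_connectivity_lec_status_counts_alt
  have h0 : (PySem.Dict.empty : PySem.Dict String (PySem.Dict String Int)) = pvMapVal PySem.Dict.empty := by rfl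
  rw [h0, pv_fold_mapVal]
  simp [pvMapVal]
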